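-- pv_equiv track=rewrite | github.com/jjstatman/aoc2023 | day7.py | parse_hand_2
-- ===== SOURCE A (Python) =====
-- def parse_hand_2(hand):
--     counts = []
--     wilds = 0
--     for i in range(2, 15):
--         if not i == 11:
--             counts.append(hand.count(i))
--         else:
--             wilds = hand.count(i)
--             counts.append(0)
--     counts[counts.index(max(counts))] += wilds
--
--     return counts
-- ===== SOURCE B (Python) =====
-- def parse_hand_2(hand):
--     counts = [0] * 13
--     wilds = 0
--     for c in hand:
--         if c == 11:
--             wilds += 1
--         elif 2 <= c <= 14:
--             counts[c - 2] += 1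
--     counts[counts.index(max(counts))] += wilds
--     return counts
-- ===== Notes on version B (the rewrite author's own statement) =====
-- stated objective: faster
-- what changed: B replaces A's 13 passes over the hand (one hand.count per card value 2..14) with a single pass that tallies each card into a 13-slot table and counts jacks as wilds, keeping the identical final counts[counts.index(max(counts))] += wilds step.
import Mathlib
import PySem

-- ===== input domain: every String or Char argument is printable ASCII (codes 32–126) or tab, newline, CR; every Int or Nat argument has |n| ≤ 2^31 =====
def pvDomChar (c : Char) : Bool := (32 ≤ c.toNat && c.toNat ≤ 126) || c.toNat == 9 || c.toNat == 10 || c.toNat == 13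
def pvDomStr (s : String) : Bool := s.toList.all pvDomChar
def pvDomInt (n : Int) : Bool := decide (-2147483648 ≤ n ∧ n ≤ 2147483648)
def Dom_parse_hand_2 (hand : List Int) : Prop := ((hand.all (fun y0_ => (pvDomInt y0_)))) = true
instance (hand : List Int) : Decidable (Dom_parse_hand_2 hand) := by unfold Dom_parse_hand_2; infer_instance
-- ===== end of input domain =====

-- B is a single pass over the hand building the 13-slot count table (instead of A's 13 hand.count scans); return value only, no mutation observable.

-- shared final line of both Pythons: counts[counts.index(max(counts))] += wilds
def pvFinish (counts : List Int) (wilds : Int) : List Int :=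
  match PySem.List.max? counts (fun y => y) with
  | none => counts          -- unreachable: counts is never empty
  | some m =>
    match PySem.List.index? counts m with
    | none => counts        -- unreachable: m ∈ counts
    | some k => counts.modify k (· + wilds)

-- ===== PORT A =====
def parse_hand_2 (hand : List Int) : List Int :=
  let st := (PySem.List.pyRange 2 15 1).foldl
    (fun (st : List Int × Int) i =>
      if ¬ (i == 11) then (st.1 ++ [(PySem.List.count hand i : Int)], st.2)
      else (st.1 ++ [(0 : Int)], (PySem.List.count hand i : Int)))
    ([], 0)
  pvFinish st.1 st.2

-- ===== PORT B =====
def parse_hand_2_alt (hand : List Int) : List Int :=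
  let st := hand.foldl
    (fun (st : List Int × Int) c =>
      if c == 11 then (st.1, st.2 + 1)
      else if 2 ≤ c ∧ c ≤ 14 then (st.1.modify (c - 2).toNat (· + 1), st.2)
      else st)
    (List.replicate 13 (0 : Int), 0)
  pvFinish st.1 st.2

-- ===== PRECONDITION & SPEC =====
def Spec_parse_hand_2 (hand : List Int) (out : List Int) : Prop := out = parse_hand_2_alt hand
instance (hand : List Int) (out : List Int) : Decidable (Spec_parse_hand_2 hand out) := by unfold Spec_parse_hand_2; infer_instance

-- ===== CLAIM (what is proved, stated in full; the proofs are below) =====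
def Claim_equal_parse_hand_2 : Prop := ∀ (hand : List Int), Dom_parse_hand_2 hand → Spec_parse_hand_2 hand (parse_hand_2 hand)

-- ===== LEMMAS AND PROOFS =====

def pvStepB : List Int × Int → Int → List Int × Int :=
  fun st c =>
    if c == 11 then (st.1, st.2 + 1)
    else if 2 ≤ c ∧ c ≤ 14 then (st.1.modify (c - 2).toNat (· + 1), st.2)
    else st

theorem pvB_len (hand : List Int) (cs : List Int) (w : Int) :
    (hand.foldl pvStepB (cs, w)).1.length = cs.length := by
  induction hand generalizing cs w with
  | nil => rfl
  | cons c t ih =>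
    simp only [List.foldl_cons, pvStepB]
    split_ifs with h1 h2
    · exact ih cs (w + 1)
    · simpa using ih (cs.modify (c - 2).toNat (· + 1)) w
    · exact ih cs w

theorem pvB_snd (hand : List Int) (cs : List Int) (w : Int) :
    (hand.foldl pvStepB (cs, w)).2 = w + (hand.count 11 : Int) := by
  induction hand generalizing cs w with
  | nil => simp
  | cons c t ih =>
    simp only [List.foldl_cons, pvStepB]
    by_cases h1 : c = 11
    · simp only [h1]
      rw [if_pos (by simp)]
      rw [ih]
      simp
      ring
    · rw [if_neg (by simpa using h1)]
      split_ifs with h2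
      · rw [ih]; simp [h1]
      · rw [ih]; simp [h1]

theorem pvB_get (hand : List Int) (cs : List Int) (w : Int) (j : Nat) (hj : j < cs.length)
    (hj13 : j < 13) :
    (hand.foldl pvStepB (cs, w)).1[j]'(by rw [pvB_len]; exact hj)
      = cs[j] + (if j = 9 then 0 else (hand.count ((j : Int) + 2) : Int)) := by
  induction hand generalizing cs w with
  | nil => simp
  | cons c t ih =>
    simp only [List.foldl_cons]
    by_cases h1 : c = 11
    · have hstep : pvStepB (cs, w) c = (cs, w + 1) := by simp [pvStepB, h1]
      simp only [hstep]
      rw [ih cs (w + 1) hj]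
      by_cases h9 : j = 9
      · simp [h9]
      · have : c ≠ (j : Int) + 2 := by omega
        simp [h9, this]
    · by_cases h2 : 2 ≤ c ∧ c ≤ 14
      · have hstep : pvStepB (cs, w) c = (cs.modify (c - 2).toNat (· + 1), w) := by
          simp [pvStepB, h1, h2]
        simp only [hstep]
        rw [ih (cs.modify (c - 2).toNat (· + 1)) w (by simpa using hj)]
        rw [List.getElem_modify]
        by_cases hc : (c - 2).toNat = j
        · have hcj : ((j : Int) + 2) = c := by omega
          have h9 : j ≠ 9 := by omega
          simp [hc, h9, hcj]
          ring
        · have hcj : c ≠ (j : Int) + 2 := by omega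
          by_cases h9 : j = 9
          · simp [h9]
            omega
          · simp [hc, h9, hcj]
      · have hstep : pvStepB (cs, w) c = (cs, w) := by simp [pvStepB, h1, h2]
        simp only [hstep]
        rw [ih cs w hj]
        by_cases h9 : j = 9
        · simp [h9]
        · have hcj : c ≠ (j : Int) + 2 := by omega
          simp [h9, hcj]

theorem pvB_table (hand : List Int) :
    hand.foldl pvStepB (List.replicate 13 (0 : Int), 0)
      = ([(hand.count 2 : Int), (hand.count 3 : Int), (hand.count 4 : Int),
          (hand.count 5 : Int), (hand.count 6 : Int), (hand.count 7 : Int),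
          (hand.count 8 : Int), (hand.count 9 : Int), (hand.count 10 : Int),
          0, (hand.count 12 : Int), (hand.count 13 : Int), (hand.count 14 : Int)],
         (hand.count 11 : Int)) := by
  refine Prod.ext ?_ ?_
  · apply List.ext_getElem (by rw [pvB_len]; rfl)
    intro j hj hj'
    have hj13 : j < 13 := by rw [pvB_len] at hj; simpa using hj
    rw [pvB_get hand (List.replicate 13 (0 : Int)) 0 j (by simpa using hj13) hj13]
    interval_cases j <;> simp
  · simpa using pvB_snd hand (List.replicate 13 (0 : Int)) 0

theorem pvA_table (hand : List Int) :
    (PySem.List.pyRange 2 15 1).foldl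
      (fun (st : List Int × Int) i =>
        if ¬ (i == 11) then (st.1 ++ [(PySem.List.count hand i : Int)], st.2)
        else (st.1 ++ [(0 : Int)], (PySem.List.count hand i : Int)))
      ([], 0)
      = ([(hand.count 2 : Int), (hand.count 3 : Int), (hand.count 4 : Int),
          (hand.count 5 : Int), (hand.count 6 : Int), (hand.count 7 : Int),
          (hand.count 8 : Int), (hand.count 9 : Int), (hand.count 10 : Int),
          0, (hand.count 12 : Int), (hand.count 13 : Int), (hand.count 14 : Int)],
         (hand.count 11 : Int)) := by
  have hr : PySem.List.pyRange 2 15 1 = [2, 3, 4, 5, 6, 7, 8, 9, 10, 11, 12, 13, 14] := by decide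
  rw [hr]
  simp [PySem.List.count]

-- ===== VERDICT (by name: the statement is the Claim_ definition above) =====
theorem parse_hand_2_spec : Claim_equal_parse_hand_2 := by
  intro hand _
  show parse_hand_2 hand = parse_hand_2_alt hand
  unfold parse_hand_2 parse_hand_2_alt
  rw [pvA_table hand]
  rw [show (fun (st : List Int × Int) c =>
      if c == 11 then (st.1, st.2 + 1)
      else if 2 ≤ c ∧ c ≤ 14 then (st.1.modify (c - 2).toNat (· + 1), st.2)
      else st) = pvStepB from rfl]
  rw [pvB_table hand]
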